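-- pv_equiv track=rewrite | github.com/rajasagashe/JuICe | jupyter/new_pipeline/to_dataset.py | truncate_code_to_lines
-- ===== SOURCE A (Python) =====
-- def truncate_code_to_lines(toks, newline_char, lines=10):
--     num = 0
--     for i, tok in enumerate(toks):
--         if tok == newline_char:
--             num += 1
--             if num == lines:
--                 return toks[:i]
--     return toks
-- ===== SOURCE B (Python) =====
-- def truncate_code_to_lines(toks, newline_char, lines=10):
--     idx = [i for i, t in enumerate(toks) if t == newline_char]
--     if lines >= 1 and len(idx) >= lines:
--         return toks[:idx[lines - 1]]
--     return toks
-- ===== Notes on version B (the rewrite author's own statement) =====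
-- stated objective: alternative
-- what changed: Replaces the early-exit counting loop with an index-table decomposition: build the list of newline positions once, then return a single guarded slice at the (lines-1)-th position.
import Mathlib
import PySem

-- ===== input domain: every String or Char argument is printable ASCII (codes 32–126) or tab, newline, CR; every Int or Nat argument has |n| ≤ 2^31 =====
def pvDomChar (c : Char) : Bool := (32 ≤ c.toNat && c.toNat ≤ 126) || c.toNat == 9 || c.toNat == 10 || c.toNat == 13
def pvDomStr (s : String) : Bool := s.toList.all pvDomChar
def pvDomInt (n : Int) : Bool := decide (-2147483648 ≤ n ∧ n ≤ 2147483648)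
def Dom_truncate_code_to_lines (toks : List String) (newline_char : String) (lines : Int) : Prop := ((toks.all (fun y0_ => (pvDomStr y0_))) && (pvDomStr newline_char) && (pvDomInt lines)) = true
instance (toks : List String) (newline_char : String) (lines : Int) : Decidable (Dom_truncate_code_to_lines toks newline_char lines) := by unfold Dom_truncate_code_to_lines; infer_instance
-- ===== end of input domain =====

-- B rewrites the early-exit counting loop as an index-table-then-slice decomposition (objective: alternative).


-- ===== PORT A =====
-- the counting loop: `full` is the original list (for `toks[:i]` and the final `return toks`)
def truncA_go (toks : List String) (full : List String) (newline_char : String)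
    (lines : Int) (i : Nat) (num : Int) : List String :=
  match toks with
  | [] => full
  | tok :: rest =>
    if tok = newline_char then
      let num' := num + 1
      if num' = lines then full.take i   -- toks[:i], i ≥ 0
      else truncA_go rest full newline_char lines (i + 1) num'
    else truncA_go rest full newline_char lines (i + 1) num

def truncate_code_to_lines (toks : List String) (newline_char : String) (lines : Int) : List String :=
  truncA_go toks toks newline_char lines 0 0

-- ===== PORT B =====
def truncate_code_to_lines_alt (toks : List String) (newline_char : String) (lines : Int) : List String :=
  let idx := (PySem.List.enumerate toks 0).filterMap
    (fun p => if p.2 = newline_char then some p.1 else none)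
  if 1 ≤ lines ∧ lines ≤ (idx.length : Int) then
    toks.take (idx.getD (lines - 1).toNat 0).toNat   -- toks[:idx[lines-1]], a nonnegative in-range index
  else toks

-- ===== PRECONDITION & SPEC =====
def Spec_truncate_code_to_lines (toks : List String) (newline_char : String) (lines : Int) (out : List String) : Prop := out = truncate_code_to_lines_alt toks newline_char lines
instance (toks : List String) (newline_char : String) (lines : Int) (out : List String) : Decidable (Spec_truncate_code_to_lines toks newline_char lines out) := by unfold Spec_truncate_code_to_lines; infer_instance

-- ===== CLAIM (what is proved, stated in full; the proofs are below) =====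
def Claim_equal_truncate_code_to_lines : Prop := ∀ (toks : List String) (newline_char : String) (lines : Int), Dom_truncate_code_to_lines toks newline_char lines → Spec_truncate_code_to_lines toks newline_char lines (truncate_code_to_lines toks newline_char lines)

-- ===== LEMMAS AND PROOFS =====

-- positions (offset by i) of tokens equal to newline_char
def nlIdx (toks : List String) (newline_char : String) (i : Nat) : List Int :=
  match toks with
  | [] => []
  | tok :: rest =>
    if tok = newline_char then (i : Int) :: nlIdx rest newline_char (i + 1)
    else nlIdx rest newline_char (i + 1)

theorem nlIdx_eq_filterMap (toks : List String) (nc : String) (i : Nat) :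
    (PySem.List.enumerate toks (i : Int)).filterMap
      (fun p => if p.2 = nc then some p.1 else none) = nlIdx toks nc i := by
  induction toks generalizing i with
  | nil => simp [PySem.List.enumerate_nil, nlIdx]
  | cons t rest ih =>
    have h1 : ((i : Int) + 1) = ((i + 1 : Nat) : Int) := by push_cast; ring
    simp only [PySem.List.enumerate_cons, List.filterMap_cons, nlIdx, h1, ih]
    by_cases h : t = nc <;> simp [h]

theorem truncA_go_eq (toks full : List String) (nc : String) (lines : Int) (i : Nat) (num : Int) :
    truncA_go toks full nc lines i num =
      (if 1 ≤ lines - num ∧ lines - num ≤ ((nlIdx toks nc i).length : Int) then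
         full.take ((nlIdx toks nc i).getD (lines - num - 1).toNat 0).toNat
       else full) := by
  induction toks generalizing i num with
  | nil =>
    simp only [truncA_go, nlIdx, List.length_nil, Nat.cast_zero]
    rw [if_neg (by omega)]
  | cons t rest ih =>
    simp only [truncA_go, nlIdx]
    by_cases h : t = nc
    · simp only [if_pos h]
      by_cases h2 : num + 1 = lines
      · rw [if_pos h2]
        rw [if_pos (show 1 ≤ lines - num ∧ lines - num ≤ (((i:Int) :: nlIdx rest nc (i+1)).length : Int) by
          refine ⟨by omega, ?_⟩; simp only [List.length_cons]; push_cast; omega)]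
        have hk : (lines - num - 1).toNat = 0 := by omega
        rw [hk]
        simp
      · rw [if_neg h2, ih]
        by_cases hc : 1 ≤ lines - (num + 1) ∧ lines - (num + 1) ≤ ((nlIdx rest nc (i + 1)).length : Int)
        · rw [if_pos hc,
            if_pos (show 1 ≤ lines - num ∧ lines - num ≤ (((i:Int) :: nlIdx rest nc (i+1)).length : Int) by
              refine ⟨by omega, ?_⟩; simp only [List.length_cons]; push_cast; omega)]
          have hk : (lines - num - 1).toNat = (lines - (num + 1) - 1).toNat + 1 := by omega
          rw [hk]
          simp [List.getD]
        · have hc2 : ¬(1 ≤ lines - num ∧ lines - num ≤ (((i:Int) :: nlIdx rest nc (i+1)).length : Int)) := by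
            simp only [List.length_cons]; push_cast; omega
          rw [if_neg hc, if_neg hc2]
    · simp only [if_neg h]
      rw [ih]

theorem truncate_code_to_lines_eq (toks : List String) (nc : String) (lines : Int) :
    truncate_code_to_lines toks nc lines = truncate_code_to_lines_alt toks nc lines := by
  unfold truncate_code_to_lines truncate_code_to_lines_alt
  rw [show (0 : Int) = ((0 : Nat) : Int) from rfl, nlIdx_eq_filterMap, truncA_go_eq]
  simp

-- ===== VERDICT (by name: the statement is the Claim_ definition above) =====
theorem truncate_code_to_lines_spec : Claim_equal_truncate_code_to_lines := by
  intro toks nc lines _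
  unfold Spec_truncate_code_to_lines
  exact truncate_code_to_lines_eq toks nc lines
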